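-- pv_equiv track=rewrite | github.com/katanayka/CADO | research/aboba/extract_noun.py | generate_complete_definitions
-- ===== SOURCE A (Python) =====
-- def generate_complete_definitions(term_definitions):
--     complete_definitions = {}
--     for term, definition in term_definitions:
--         if term not in complete_definitions:
--             complete_definitions[term] = []
--         complete_definitions[term].append(definition)
--
--     # Combine definitions into complete sentences
--     for term, definitions in complete_definitions.items():
--         complete_definitions[term] = " ".join(definitions)
--
--     return complete_definitions
-- ===== SOURCE B (Python) =====
-- def generate_complete_definitions(term_definitions):
--     result = {}
--     for term, definition in term_definitions:
--         if term in result: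
--             result[term] = result[term] + " " + definition
--         else:
--             result[term] = definition
--     return result
-- ===== Notes on version B (the rewrite author's own statement) =====
-- stated objective: simpler
-- what changed: Single pass maintaining a term->joined-string dict (appending " "+definition on repeat terms) instead of grouping definitions into lists and then a second loop joining each list.
import Mathlib
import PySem

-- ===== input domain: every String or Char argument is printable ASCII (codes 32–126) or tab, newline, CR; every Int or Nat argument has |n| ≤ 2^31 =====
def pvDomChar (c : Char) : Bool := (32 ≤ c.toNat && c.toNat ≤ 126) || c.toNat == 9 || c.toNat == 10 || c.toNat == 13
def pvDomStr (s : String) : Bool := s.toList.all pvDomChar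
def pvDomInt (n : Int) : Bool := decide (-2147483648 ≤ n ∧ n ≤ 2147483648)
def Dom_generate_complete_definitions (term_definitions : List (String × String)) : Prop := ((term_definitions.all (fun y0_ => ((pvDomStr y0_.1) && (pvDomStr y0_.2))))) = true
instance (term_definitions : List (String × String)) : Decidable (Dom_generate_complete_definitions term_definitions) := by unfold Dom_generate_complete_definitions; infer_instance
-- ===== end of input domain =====

-- B replaces A's group-into-lists-then-join two-pass with one pass keeping a running joined string per term (simpler: no second loop).


-- ===== PORT A =====
-- first loop: group the definitions of each term into a list (dict values : List String)
def pvStepA (d : PySem.Dict String (List String)) (p : String × String) : PySem.Dict String (List String) :=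
  (if d.contains p.1 then d else d.insert p.1 []).modify p.1 [] (fun v => v ++ [p.2])

-- second loop: each existing value is overwritten in place by " ".join(definitions);
-- an overwrite keeps the key's position, so this is a map over the items of the first loop's dict
def generate_complete_definitions (term_definitions : List (String × String)) : List (String × String) :=
  (term_definitions.foldl pvStepA PySem.Dict.empty).items.map (fun p => (p.1, PySem.Str.join " " p.2))

-- ===== PORT B =====
-- one pass: first occurrence stores the definition, later ones append " " + definition
def pvStepB (d : PySem.Dict String String) (p : String × String) : PySem.Dict String String :=
  match d.get? p.1 with
  | some s => d.insert p.1 (s ++ " " ++ p.2)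
  | none   => d.insert p.1 p.2

def generate_complete_definitions_alt (term_definitions : List (String × String)) : List (String × String) :=
  (term_definitions.foldl pvStepB PySem.Dict.empty).items

-- ===== PRECONDITION & SPEC =====
def Spec_generate_complete_definitions (term_definitions : List (String × String)) (out : List (String × String)) : Prop := out = generate_complete_definitions_alt term_definitions
instance (term_definitions : List (String × String)) (out : List (String × String)) : Decidable (Spec_generate_complete_definitions term_definitions out) := by unfold Spec_generate_complete_definitions; infer_instance

-- ===== CLAIM (what is proved, stated in full; the proofs are below) =====
def Claim_equal_generate_complete_definitions : Prop := ∀ (term_definitions : List (String × String)), Dom_generate_complete_definitions term_definitions → Spec_generate_complete_definitions term_definitions (generate_complete_definitions term_definitions)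

-- ===== LEMMAS AND PROOFS =====

-- join of a snoc, for a nonempty list: " ".join(ds + [x]) = " ".join(ds) + " " + x
theorem pv_chars_join_snoc (sep x : List Char) (ds : List (List Char)) (h : ds ≠ []) :
    PySem.Chars.join sep (ds ++ [x]) = PySem.Chars.join sep ds ++ sep ++ x := by
  induction ds with
  | nil => exact absurd rfl h
  | cons a t ih =>
    cases t with
    | nil => simp [PySem.Chars.join_singleton, PySem.Chars.join_cons_cons]
    | cons b t' =>
      rw [show (a :: b :: t') ++ [x] = a :: b :: (t' ++ [x]) from rfl,
          PySem.Chars.join_cons_cons,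
          show (b : List Char) :: (t' ++ [x]) = (b :: t') ++ [x] from rfl,
          ih (by simp), PySem.Chars.join_cons_cons]
      simp [List.append_assoc]

theorem pv_join_snoc (x : String) (ds : List String) (h : ds ≠ []) :
    PySem.Str.join " " (ds ++ [x]) = PySem.Str.join " " ds ++ " " ++ x := by
  apply String.toList_injective
  simp only [String.toList_append, PySem.Str.toList_join, List.map_append, List.map_cons,
    List.map_nil]
  exact pv_chars_join_snoc " ".toList x.toList (ds.map String.toList) (by simpa using h)

-- the loop invariant relating A's list-valued dict to B's string-valued dict
def pvInv (dA : PySem.Dict String (List String)) (dB : PySem.Dict String String) : Prop :=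
  dA.keys = dB.keys ∧ dA.keys.Nodup ∧
  (∀ k, dB.get? k = (dA.get? k).map (fun ds => PySem.Str.join " " ds)) ∧
  (∀ k ds, dA.get? k = some ds → ds ≠ [])

theorem pvInv_step (dA : PySem.Dict String (List String)) (dB : PySem.Dict String String)
    (p : String × String) (h : pvInv dA dB) : pvInv (pvStepA dA p) (pvStepB dB p) := by
  obtain ⟨hk, hnd, hget, hne⟩ := h
  cases hA : dA.get? p.1 with
  | none =>
    have hc : dA.contains p.1 = false := by rw [PySem.Dict.contains_eq_isSome_get?, hA]; rfl
    have hB : dB.get? p.1 = none := by rw [hget, hA]; rfl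
    have hstepA : pvStepA dA p = dA.insert p.1 [p.2] := by
      show (if dA.contains p.1 then dA else dA.insert p.1 []).insert p.1 _ = _
      rw [hc]
      simp only [Bool.false_eq_true, if_false]
      rw [PySem.Dict.getD_of_get?_eq_some _ [] (PySem.Dict.get?_insert_self dA p.1 []),
        PySem.Dict.insert_insert_self]
      rfl
    have hstepB : pvStepB dB p = dB.insert p.1 p.2 := by unfold pvStepB; rw [hB]
    refine ⟨?_, ?_, ?_, ?_⟩
    · rw [hstepA, hstepB, PySem.Dict.keys_insert_of_not_contains dA _ hc,
        PySem.Dict.keys_insert_of_not_contains dB _ (by rw [PySem.Dict.contains_eq_isSome_get?, hB]; rfl), hk]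
    · rw [hstepA]; exact PySem.Dict.nodup_keys_insert _ _ _ hnd
    · intro k
      rw [hstepA, hstepB, PySem.Dict.get?_insert, PySem.Dict.get?_insert]
      split_ifs with hkk
      · simp [PySem.Chars.join_singleton, PySem.Str.join]
      · exact hget k
    · intro k ds hds
      rw [hstepA, PySem.Dict.get?_insert] at hds
      split_ifs at hds with hkk
      · cases hds; simp
      · exact hne k ds hds
  | some ds =>
    have hc : dA.contains p.1 = true := by rw [PySem.Dict.contains_eq_isSome_get?, hA]; rfl
    have hB : dB.get? p.1 = some (PySem.Str.join " " ds) := by rw [hget, hA]; rfl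
    have hstepA : pvStepA dA p = dA.insert p.1 (ds ++ [p.2]) := by
      show (if dA.contains p.1 then dA else dA.insert p.1 []).insert p.1 _ = _
      rw [hc]
      simp only [if_true]
      rw [PySem.Dict.getD_of_get?_eq_some _ [] hA]
    have hstepB : pvStepB dB p = dB.insert p.1 (PySem.Str.join " " ds ++ " " ++ p.2) := by
      unfold pvStepB; rw [hB]
    refine ⟨?_, ?_, ?_, ?_⟩
    · rw [hstepA, hstepB, PySem.Dict.keys_insert_of_contains dA _ hc,
        PySem.Dict.keys_insert_of_contains dB _ (by rw [PySem.Dict.contains_eq_isSome_get?, hB]; rfl), hk]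
    · rw [hstepA, PySem.Dict.keys_insert_of_contains dA _ hc]; exact hnd
    · intro k
      rw [hstepA, hstepB, PySem.Dict.get?_insert, PySem.Dict.get?_insert]
      split_ifs with hkk
      · rw [Option.map_some, pv_join_snoc p.2 ds (hne _ _ hA)]
      · exact hget k
    · intro k ds' hds
      rw [hstepA, PySem.Dict.get?_insert] at hds
      split_ifs at hds with hkk
      · cases hds; simp
      · exact hne k ds' hds

theorem pvInv_foldl (l : List (String × String)) (dA : PySem.Dict String (List String))
    (dB : PySem.Dict String String) (h : pvInv dA dB) :
    pvInv (l.foldl pvStepA dA) (l.foldl pvStepB dB) := by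
  induction l generalizing dA dB with
  | nil => exact h
  | cons p t ih => exact ih _ _ (pvInv_step dA dB p h)

-- ===== VERDICT (by name: the statement is the Claim_ definition above) =====
theorem generate_complete_definitions_spec : Claim_equal_generate_complete_definitions := by
  intro l _
  unfold Spec_generate_complete_definitions generate_complete_definitions generate_complete_definitions_alt
  obtain ⟨hk, hnd, hget, hne⟩ :=
    pvInv_foldl l PySem.Dict.empty PySem.Dict.empty
      ⟨rfl, PySem.Dict.nodup_keys_empty, fun k => by rw [PySem.Dict.get?_empty, PySem.Dict.get?_empty]; rfl,
       fun k ds h => by rw [PySem.Dict.get?_empty] at h; cases h⟩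
  set dA := l.foldl pvStepA PySem.Dict.empty
  set dB := l.foldl pvStepB PySem.Dict.empty
  rw [PySem.Dict.items_eq_map_keys dA hnd [], PySem.Dict.items_eq_map_keys dB (hk ▸ hnd) "",
    ← hk, List.map_map]
  apply List.map_congr_left
  intro k hkmem
  cases hA : dA.get? k with
  | none => exact absurd hkmem ((PySem.Dict.get?_eq_none_iff_not_mem_keys dA k).mp hA)
  | some ds =>
    have hB : dB.get? k = some (PySem.Str.join " " ds) := by rw [hget, hA]; rfl
    simp [PySem.Dict.getD_of_get?_eq_some _ _ hA, PySem.Dict.getD_of_get?_eq_some _ _ hB]
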